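-- pv_equiv track=rewrite | github.com/AdamZhouSE/pythonHomework | Code/CodeRecords/2793/60749/273121.py | count
-- ===== SOURCE A (Python) =====
-- def count(timearray,c):
--     if len(timearray)==0:
--         return 0
--
--     count=1
--     for h in range(0,len(timearray)-1):
--         if timearray[h+1]-timearray[h] <=c:
--             count+=1
--         else:
--             count=1
--     return count
-- ===== SOURCE B (Python) =====
-- def count(timearray, c):
--     if len(timearray) == 0:
--         return 0
--     n = 1
--     rev = timearray[::-1]
--     for x, y in zip(rev, rev[1:]):
--         if x - y <= c:
--             n += 1
--         else:
--             break
--     return n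
-- ===== Notes on version B (the rewrite author's own statement) =====
-- stated objective: alternative
-- what changed: Replaces the forward full scan with reset-on-gap by a backward scan from the end of the array that stops at the first gap, counting the trailing run directly.
import Mathlib
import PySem

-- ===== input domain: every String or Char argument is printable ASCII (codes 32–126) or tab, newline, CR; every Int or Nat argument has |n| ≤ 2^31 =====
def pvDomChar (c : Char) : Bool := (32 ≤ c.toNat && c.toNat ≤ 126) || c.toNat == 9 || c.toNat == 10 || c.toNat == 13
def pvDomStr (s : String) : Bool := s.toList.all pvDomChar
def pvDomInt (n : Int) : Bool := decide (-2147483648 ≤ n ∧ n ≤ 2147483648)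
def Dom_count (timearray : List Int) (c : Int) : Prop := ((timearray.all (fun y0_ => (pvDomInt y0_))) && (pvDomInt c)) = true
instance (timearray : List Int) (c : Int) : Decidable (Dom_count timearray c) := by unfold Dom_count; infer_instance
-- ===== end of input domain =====

-- B scans backward from the end and stops at the first gap, instead of A's forward scan with a reset; same value, different traversal (objective: alternative).

-- ===== PORT A =====
def count (timearray : List Int) (c : Int) : Int :=
  if timearray.length == 0 then 0
  else
    (PySem.List.pyRange 0 ((timearray.length : Int) - 1) 1).foldl
      (fun cnt h =>
        if PySem.List.pyGetD timearray (h + 1) 0 - PySem.List.pyGetD timearray h 0 ≤ c then cnt + 1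
        else 1) 1

-- ===== PORT B =====
-- Source B's backward scan with break over zip(rev, rev[1:]): structural recursion on the reversed list
def countBack (c : Int) : List Int → Int
  | [] => 1
  | [_] => 1
  | x :: y :: rest => if x - y ≤ c then 1 + countBack c (y :: rest) else 1

def count_alt (timearray : List Int) (c : Int) : Int :=
  if timearray.length == 0 then 0
  else countBack c timearray.reverse

-- ===== PRECONDITION & SPEC =====
def Spec_count (timearray : List Int) (c : Int) (out : Int) : Prop := out = count_alt timearray c
instance (timearray : List Int) (c : Int) (out : Int) : Decidable (Spec_count timearray c out) := by unfold Spec_count; infer_instance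

-- ===== CLAIM (what is proved, stated in full; the proofs are below) =====
def Claim_equal_count : Prop := ∀ (timearray : List Int) (c : Int), Dom_count timearray c → Spec_count timearray c (count timearray c)

-- ===== LEMMAS AND PROOFS =====

theorem pyGetD_app (t : List Int) (a i d : Int) (h0 : 0 ≤ i) (h1 : i < t.length) :
    PySem.List.pyGetD (t ++ [a]) i d = PySem.List.pyGetD t i d := by
  rw [PySem.List.pyGetD_eq_getElem (t ++ [a]) d h0 (by simp; omega),
      PySem.List.pyGetD_eq_getElem t d h0 h1]
  exact List.getElem_append_left (by omega)

theorem count_append (t : List Int) (a c : Int) (h : t ≠ []) :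
    count (t ++ [a]) c =
      if a - t.getLast h ≤ c then count t c + 1 else 1 := by
  have hlen : 1 ≤ t.length := List.length_pos_iff.mpr h
  unfold count
  have g1 : ¬((((t ++ [a]).length) == 0) = true) := by simp
  have g2 : ¬(((t.length) == 0) = true) := by simp [h]
  rw [if_neg g1, if_neg g2]
  have h0 : (((t ++ [a]).length : Nat) : Int) - 1 = ((t.length : Int) - 1) + 1 := by
    simp
  rw [h0, PySem.List.pyRange_one_succ_right (by omega), List.foldl_append]
  have hcg := PySem.List.foldl_congr_mem
      (l := PySem.List.pyRange 0 ((t.length : Int) - 1) 1) (init := (1 : Int))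
      (f := fun cnt h =>
        if PySem.List.pyGetD (t ++ [a]) (h + 1) 0 - PySem.List.pyGetD (t ++ [a]) h 0 ≤ c then cnt + 1 else 1)
      (g := fun cnt h =>
        if PySem.List.pyGetD t (h + 1) 0 - PySem.List.pyGetD t h 0 ≤ c then cnt + 1 else 1)
      (by
        intro acc x hx
        rw [PySem.List.mem_pyRange_one] at hx
        simp only
        rw [pyGetD_app t a x 0 hx.1 (by omega), pyGetD_app t a (x+1) 0 (by omega) (by omega)])
  simp only [List.foldl_cons, List.foldl_nil]
  rw [hcg]
  have hA : PySem.List.pyGetD (t ++ [a]) ((t.length : Int) - 1 + 1) 0 = a := by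
    rw [PySem.List.pyGetD_eq_getElem (t ++ [a]) 0 (by omega) (by simp)]
    simp
  have hL : PySem.List.pyGetD (t ++ [a]) ((t.length : Int) - 1) 0 = t.getLast h := by
    rw [pyGetD_app t a _ 0 (by omega) (by omega),
        PySem.List.pyGetD_eq_getElem t 0 (by omega) (by omega),
        List.getLast_eq_getElem]
    congr 1
    omega
  rw [hA, hL]

theorem countBack_append (t : List Int) (a c : Int) (h : t ≠ []) :
    countBack c (t ++ [a]).reverse =
      if a - t.getLast h ≤ c then 1 + countBack c t.reverse else 1 := by
  obtain ⟨y, s, hys⟩ : ∃ y s, t.reverse = y :: s := by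
    cases ht : t.reverse with
    | nil => exact absurd (by simpa using ht) h
    | cons y s => exact ⟨y, s, rfl⟩
  have hy : y = t.getLast h := by
    have h2 := List.getLast?_eq_head?_reverse (xs := t)
    rw [hys, List.getLast?_eq_some_getLast h] at h2
    simpa using h2.symm
  rw [List.reverse_append, List.reverse_singleton, List.singleton_append, hys, countBack, hy]

theorem count_eq_alt (t : List Int) (c : Int) : count t c = count_alt t c := by
  induction t using List.reverseRecOn with
  | nil => rfl
  | append_singleton t a ih =>
    cases t with
    | nil => rfl
    | cons b s =>
      have h : (b :: s) ≠ [] := by simp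
      rw [count_append _ a c h]
      unfold count_alt at ih ⊢
      rw [if_neg (show ¬((((b :: s).length) == 0) = true) by simp)] at ih
      rw [if_neg (show ¬((((b :: s ++ [a]).length) == 0) = true) by simp),
          countBack_append _ a c h, ← ih]
      split <;> omega

-- ===== VERDICT (by name: the statement is the Claim_ definition above) =====
theorem count_spec : Claim_equal_count := by
  intro t c _
  exact count_eq_alt t c
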